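-- pv_equiv track=rewrite | github.com/taoshidev/ptn-trading-server | run_at_bybit_relay.py | calculate_gradient_allocation
-- ===== SOURCE A (Python) =====
-- def calculate_gradient_allocation(max_rank):
-- 	# Calculate the gradient allocation for each rank with lower ranks (higher priority) receiving larger portions.
--
-- 	# Calculate the total weight by summing the inverted rank values
-- 	total_weight = sum(max_rank + 1 - rank for rank in range(1, max_rank + 1))
--
-- 	# Calculate the allocation for each rank
-- 	allocations = {}
-- 	for rank in range(1, max_rank + 1):
-- 		inverted_rank = max_rank + 1 - rank
-- 		numerator = inverted_rank
-- 		denominator = total_weight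
-- 		allocations[rank] = (numerator, denominator)
--
-- 	return allocations
-- ===== SOURCE B (Python) =====
-- def calculate_gradient_allocation(max_rank):
-- 	# Closed-form total weight (sum 1..max_rank), then a dict comprehension.
-- 	total_weight = max_rank * (max_rank + 1) // 2
-- 	return {rank: (max_rank + 1 - rank, total_weight) for rank in range(1, max_rank + 1)}
-- ===== Notes on version B (the rewrite author's own statement) =====
-- stated objective: simpler
-- what changed: Replaces the explicit summation loop by the closed Gauss formula for the total weight and builds the dict with a single comprehension instead of an accumulator loop.
import Mathlib
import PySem

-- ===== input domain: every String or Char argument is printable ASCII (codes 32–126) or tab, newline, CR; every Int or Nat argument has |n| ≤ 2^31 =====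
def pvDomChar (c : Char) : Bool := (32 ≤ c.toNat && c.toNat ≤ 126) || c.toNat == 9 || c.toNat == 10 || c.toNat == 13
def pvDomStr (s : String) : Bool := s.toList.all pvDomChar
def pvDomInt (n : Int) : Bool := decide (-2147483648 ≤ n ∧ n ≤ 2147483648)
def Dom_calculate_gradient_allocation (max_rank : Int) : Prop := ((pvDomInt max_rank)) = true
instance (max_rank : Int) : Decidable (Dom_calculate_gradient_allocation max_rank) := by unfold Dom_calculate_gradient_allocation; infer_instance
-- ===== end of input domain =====

-- B replaces A's summation loop by the closed form max_rank*(max_rank+1)//2 and builds the dict with a comprehension (simpler).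


-- ===== PORT A =====
def calculate_gradient_allocation (max_rank : Int) : List (Int × Int × Int) :=
  let total_weight :=
    ((PySem.List.pyRange 1 (max_rank + 1) 1).map (fun rank => max_rank + 1 - rank)).sum
  let allocations :=
    (PySem.List.pyRange 1 (max_rank + 1) 1).foldl
      (fun (d : PySem.Dict Int (Int × Int)) rank =>
        d.insert rank (max_rank + 1 - rank, total_weight))
      PySem.Dict.empty
  allocations.items

-- ===== PORT B =====
def calculate_gradient_allocation_alt (max_rank : Int) : List (Int × Int × Int) :=
  let total_weight := PySem.Int.floordiv (max_rank * (max_rank + 1)) 2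
  (PySem.List.pyRange 1 (max_rank + 1) 1).map
    (fun rank => (rank, (max_rank + 1 - rank, total_weight)))

-- ===== PRECONDITION & SPEC =====
def Spec_calculate_gradient_allocation (max_rank : Int) (out : List (Int × Int × Int)) : Prop := out = calculate_gradient_allocation_alt max_rank
instance (max_rank : Int) (out : List (Int × Int × Int)) : Decidable (Spec_calculate_gradient_allocation max_rank out) := by unfold Spec_calculate_gradient_allocation; infer_instance

-- ===== CLAIM (what is proved, stated in full; the proofs are below) =====
def Claim_equal_calculate_gradient_allocation : Prop := ∀ (max_rank : Int), Dom_calculate_gradient_allocation max_rank → Spec_calculate_gradient_allocation max_rank (calculate_gradient_allocation max_rank)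

-- ===== LEMMAS AND PROOFS =====

-- Gauss: twice A's summation loop equals m*(m+1) (for m = n a natural number).
theorem pv_sum_gauss (n : Nat) :
    2 * ((PySem.List.pyRange 1 ((n : Int) + 1) 1).map
          (fun rank => (n : Int) + 1 - rank)).sum = (n : Int) * ((n : Int) + 1) := by
  induction n with
  | zero => simp [PySem.List.pyRange_one_eq_nil]
  | succ k ih =>
    have hsplit : PySem.List.pyRange 1 ((k : Int) + 1 + 1) 1
        = PySem.List.pyRange 1 ((k : Int) + 1) 1 ++ [(k : Int) + 1] :=
      PySem.List.pyRange_one_succ_right (by omega)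
    have hshift : ∀ (xs : List Int),
        (xs.map (fun rank => (k : Int) + 1 + 1 - rank)).sum
        = (xs.map (fun rank => (k : Int) + 1 - rank)).sum + xs.length := by
      intro xs
      induction xs with
      | nil => simp
      | cons x t ihx =>
        simp only [List.map_cons, List.sum_cons, List.length_cons]
        push_cast
        omega
    have hlen := PySem.List.length_pyRange_one 1 ((k : Int) + 1)
    push_cast
    rw [hsplit]
    simp only [List.map_append, List.sum_append, List.map_cons, List.map_nil,
      List.sum_cons, List.sum_nil]
    rw [hshift]
    have hlen' : ((PySem.List.pyRange 1 ((k : Int) + 1) 1).length : Int) = k := by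
      rw [hlen]; omega
    push_cast at ih ⊢
    rw [hlen']
    ring_nf
    ring_nf at ih
    omega

theorem pv_total_eq (m : Int) (hm : 0 ≤ m) :
    ((PySem.List.pyRange 1 (m + 1) 1).map (fun rank => m + 1 - rank)).sum
      = PySem.Int.floordiv (m * (m + 1)) 2 := by
  obtain ⟨n, rfl⟩ := Int.eq_ofNat_of_zero_le hm
  have h := pv_sum_gauss n
  rw [eq_comm, PySem.Int.floordiv_eq_iff_of_pos (by norm_num)]
  omega

-- ===== VERDICT (by name: the statement is the Claim_ definition above) =====
theorem calculate_gradient_allocation_spec : Claim_equal_calculate_gradient_allocation := by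
  intro m _
  unfold Spec_calculate_gradient_allocation calculate_gradient_allocation
    calculate_gradient_allocation_alt
  by_cases hm : m ≤ 0
  · simp [PySem.List.pyRange_one_eq_nil (by omega : m + 1 ≤ 1), PySem.Dict.empty]
  · push Not at hm
    rw [pv_total_eq m (le_of_lt hm)]
    rw [PySem.Dict.items_foldl_insert_fresh
      (l := PySem.List.pyRange 1 (m + 1) 1)
      (k := fun rank => rank)
      (v := fun rank => (m + 1 - rank, PySem.Int.floordiv (m * (m + 1)) 2))
      (d := PySem.Dict.empty)
      (by intro a _; rfl)
      (by simpa using PySem.List.nodup_pyRange_one 1 (m + 1))]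
    simp [PySem.Dict.empty]
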